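-- pv_equiv track=rewrite | github.com/gusraujo/DSA-365-Days-Challenge | Python/Day 17/test_main.py | rate_limiter
-- ===== SOURCE A (Python) =====
-- def rate_limiter(events: list[tuple[str, int]], N, T) -> list[bool]:
--     if not events:
--         return {}
--
--     result = []
--     current_time = events[-1][1]
--     window_start = current_time - T
--     rateCounter = 0
--     for service_id, timestamp in events:
--         if timestamp >= window_start and rateCounter < N:
--             result.append(True)
--             rateCounter += 1
--         else:
--             result.append(False)
--     return result
-- ===== SOURCE B (Python) =====
-- def rate_limiter(events: list[tuple[str, int]], N, T) -> list[bool]: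
--     if not events:
--         return []
--     window_start = events[-1][1] - T
--     hits = [ts >= window_start for _, ts in events]
--     return [hits[i] and sum(hits[:i]) < N for i in range(len(events))]
-- ===== Notes on version B (the rewrite author's own statement) =====
-- stated objective: alternative
-- what changed: Replaces the streaming counter loop by a per-index closed form: result[i] = in-window(i) and (number of in-window events before i) < N, computed over a precomputed hit mask.
-- outside the precondition, e.g. on rate_limiter([], 1, 1): A returns {}, B returns []
import Mathlib
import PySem

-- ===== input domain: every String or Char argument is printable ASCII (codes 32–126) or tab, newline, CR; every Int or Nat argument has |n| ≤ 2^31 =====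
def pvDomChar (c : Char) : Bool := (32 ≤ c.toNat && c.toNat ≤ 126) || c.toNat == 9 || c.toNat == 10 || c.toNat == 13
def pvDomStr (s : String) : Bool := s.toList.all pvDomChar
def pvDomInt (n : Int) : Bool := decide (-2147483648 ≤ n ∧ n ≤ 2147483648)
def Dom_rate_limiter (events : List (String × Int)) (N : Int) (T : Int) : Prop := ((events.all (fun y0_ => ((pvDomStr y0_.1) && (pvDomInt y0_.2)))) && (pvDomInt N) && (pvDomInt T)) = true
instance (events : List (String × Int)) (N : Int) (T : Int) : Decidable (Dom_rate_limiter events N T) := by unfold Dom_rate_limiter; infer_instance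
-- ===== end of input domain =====

-- B replaces A's streaming rate counter by a per-index closed form over a precomputed
-- hit mask (result[i] = hit i && #hits before i < N); objective: alternative decomposition.

-- ===== PORT A =====
def rate_limiter (events : List (String × Int)) (N : Int) (T : Int) : List Bool :=
  if events = [] then []   -- Python A returns {} here; excluded by Pre_rate_limiter (not a list value)
  else
    let current_time := (PySem.List.pyGetD events (-1) ("", 0)).2
    let window_start := current_time - T
    (events.foldl
      (fun (st : List Bool × Int) e =>
        if e.2 ≥ window_start ∧ st.2 < N then (st.1 ++ [true], st.2 + 1)
        else (st.1 ++ [false], st.2))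
      ([], 0)).1

-- ===== PORT B =====
def rate_limiter_alt (events : List (String × Int)) (N : Int) (T : Int) : List Bool :=
  if events = [] then []
  else
    let window_start := (PySem.List.pyGetD events (-1) ("", 0)).2 - T
    let hits := events.map (fun e => decide (e.2 ≥ window_start))
    -- sum(hits[:i]) over Python bools is the number of True entries: ported as count true (exact)
    (List.range events.length).map (fun i =>
      hits.getD i false && decide (((hits.take i).count true : Int) < N))

-- ===== PRECONDITION & SPEC =====
-- Pre_ excludes only the empty event list, on which A returns {} (an empty dict, not a
-- value of the declared list[bool] type); B returns [] there.
def Pre_rate_limiter (events : List (String × Int)) (N : Int) (T : Int) : Prop := events ≠ []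
instance (events : List (String × Int)) (N : Int) (T : Int) : Decidable (Pre_rate_limiter events N T) := by unfold Pre_rate_limiter; infer_instance
def pvWitness_rate_limiter : (List (String × Int)) × Int × Int := ([("a", 3), ("b", 5)], 1, 4)

def Spec_rate_limiter (events : List (String × Int)) (N : Int) (T : Int) (out : List Bool) : Prop := out = rate_limiter_alt events N T
instance (events : List (String × Int)) (N : Int) (T : Int) (out : List Bool) : Decidable (Spec_rate_limiter events N T out) := by unfold Spec_rate_limiter; infer_instance

-- ===== CLAIM (what is proved, stated in full; the proofs are below) =====
def Claim_equal_rate_limiter : Prop := ∀ (events : List (String × Int)) (N : Int) (T : Int), Dom_rate_limiter events N T → Pre_rate_limiter events N T → Spec_rate_limiter events N T (rate_limiter events N T)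

-- ===== LEMMAS AND PROOFS =====

-- Reference recursion: A's loop body as structural recursion over the events.
def goA (ws N : Int) : List (String × Int) → Int → List Bool
  | [], _ => []
  | e :: es, c =>
    if e.2 ≥ ws ∧ c < N then true :: goA ws N es (c + 1) else false :: goA ws N es c

theorem foldA_eq (ws N : Int) (es : List (String × Int)) (acc : List Bool) (c : Int) :
    (es.foldl
      (fun (st : List Bool × Int) e =>
        if e.2 ≥ ws ∧ st.2 < N then (st.1 ++ [true], st.2 + 1)
        else (st.1 ++ [false], st.2))
      (acc, c)).1 = acc ++ goA ws N es c := by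
  induction es generalizing acc c with
  | nil => simp [goA]
  | cons e es ih =>
    simp only [List.foldl_cons, goA]
    split
    · rw [ih]; simp
    · rw [ih]; simp

theorem goA_saturated (ws N : Int) (es : List (String × Int)) (c : Int) (h : N ≤ c) :
    goA ws N es c = List.replicate es.length false := by
  induction es generalizing c with
  | nil => simp [goA]
  | cons e es ih =>
    rw [goA, if_neg (fun hc => absurd hc.2 (not_lt.2 h))]
    simp [ih c h, List.replicate_succ]

theorem goA_eq_map (ws N : Int) (es : List (String × Int)) (c : Int) :
    goA ws N es c = (List.range es.length).map (fun i =>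
      (es.map (fun e => decide (e.2 ≥ ws))).getD i false &&
        decide (c + (((es.map (fun e => decide (e.2 ≥ ws))).take i).count true : Int) < N)) := by
  induction es generalizing c with
  | nil => simp [goA]
  | cons e es ih =>
    rw [goA, List.length_cons, List.range_succ_eq_map, List.map_cons, List.map_map]
    by_cases he : e.2 ≥ ws
    · by_cases hc : c < N
      · rw [if_pos ⟨he, hc⟩]
        refine congrArg₂ List.cons (by simp [he, hc]) ?_
        rw [ih (c + 1)]
        refine List.map_congr_left (fun i _ => ?_)
        simp only [Function.comp_apply, Nat.succ_eq_add_one, List.getD_cons_succ,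
          List.take_succ_cons, List.count_cons, List.map_cons]
        congr 1
        rw [decide_eq_decide]
        simp [he]
        omega
      · rw [if_neg (fun h => hc h.2)]
        refine congrArg₂ List.cons (by simp [hc]) ?_
        rw [goA_saturated ws N es c (not_lt.1 hc)]
        have hall : ∀ i ∈ List.range es.length,
            ((fun i => (List.map (fun e => decide (e.2 ≥ ws)) (e :: es)).getD i false &&
              decide (c + (((List.map (fun e => decide (e.2 ≥ ws)) (e :: es)).take i).count true : Int) < N)) ∘ Nat.succ) i = false := by
          intro i _
          have hnn : (0 : Int) ≤ (((List.map (fun e => decide (e.2 ≥ ws)) (e :: es)).take (i + 1)).count true : Int) := Int.natCast_nonneg _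
          have hfls : decide (c + (((List.map (fun e => decide (e.2 ≥ ws)) (e :: es)).take (i + 1)).count true : Int) < N) = false := by
            rw [decide_eq_false_iff_not]
            omega
          simp only [Function.comp_apply, Nat.succ_eq_add_one, hfls, Bool.and_false]
        rw [List.map_congr_left hall]
        simp [List.map_const']
    · rw [if_neg (fun h => he h.1)]
      refine congrArg₂ List.cons (by simp [he]) ?_
      rw [ih c]
      refine List.map_congr_left (fun i _ => ?_)
      simp only [Function.comp_apply, Nat.succ_eq_add_one, List.getD_cons_succ,
        List.take_succ_cons, List.count_cons, List.map_cons]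
      simp [he]

-- ===== VERDICT (by name: the statement is the Claim_ definition above) =====
theorem rate_limiter_spec : Claim_equal_rate_limiter := by
  intro events N T _ hpre
  unfold Spec_rate_limiter rate_limiter rate_limiter_alt
  rw [if_neg hpre, if_neg hpre]
  rw [foldA_eq, List.nil_append, goA_eq_map]
  refine List.map_congr_left (fun i _ => ?_)
  simp
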